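-- pv_equiv track=rewrite | github.com/SeidoAI/keel | src/tripwire/_internal/tripwires/stopped_to_ask.py | _scope_creep
-- ===== SOURCE A (Python) =====
-- from collections.abc import Iterable
--
-- def _scope_creep(touched: Iterable[str], key_files: list[str]) -> bool:
--     """Return True iff at least one touched file is outside key_files.
--
--     A touched file is "inside" if it equals a key entry or starts
--     with a key entry that ends in ``/`` (directory prefix). With no
--     key_files, anything touched counts as creep — the session
--     declared no scope.
--     """
--     touched_list = list(touched)
--     if not touched_list:
--         return False
--     if not key_files:
--         return True
--     for f in touched_list:
--         if not _file_in_key_set(f, key_files):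
--             return True
--     return False
--
-- def _file_in_key_set(path: str, key_files: list[str]) -> bool:
--     for key in key_files:
--         if not key:
--             continue
--         if key.endswith("/"):
--             if path.startswith(key):
--                 return True
--         elif path == key:
--             return True
--     return False
-- ===== SOURCE B (Python) =====
-- def _covered(f, exact, dirs):
--     return f in exact or any(
--         f[:i + 1] in dirs for i, c in enumerate(f) if c == "/"
--     )
--
-- def _scope_creep(touched, key_files):
--     touched_list = list(touched)
--     if not touched_list:
--         return False
--     if not key_files:
--         return True
--     exact = set()
--     dirs = set()
--     for key in key_files:
--         if key.endswith("/"):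
--             dirs.add(key)
--         elif key:
--             exact.add(key)
--     return any(not _covered(f, exact, dirs) for f in touched_list)
-- ===== Notes on version B (the rewrite author's own statement) =====
-- stated objective: alternative
-- what changed: Instead of rescanning the whole key_files list for every touched file, B builds an exact-key set and a directory-prefix set once, then checks each touched file by set membership of the file itself and of each of its slash-terminated prefixes; this removes the per-file scan of key_files but pays for building the sets and slicing prefixes, so measured cost is similar on the generated inputs.
import Mathlib
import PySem

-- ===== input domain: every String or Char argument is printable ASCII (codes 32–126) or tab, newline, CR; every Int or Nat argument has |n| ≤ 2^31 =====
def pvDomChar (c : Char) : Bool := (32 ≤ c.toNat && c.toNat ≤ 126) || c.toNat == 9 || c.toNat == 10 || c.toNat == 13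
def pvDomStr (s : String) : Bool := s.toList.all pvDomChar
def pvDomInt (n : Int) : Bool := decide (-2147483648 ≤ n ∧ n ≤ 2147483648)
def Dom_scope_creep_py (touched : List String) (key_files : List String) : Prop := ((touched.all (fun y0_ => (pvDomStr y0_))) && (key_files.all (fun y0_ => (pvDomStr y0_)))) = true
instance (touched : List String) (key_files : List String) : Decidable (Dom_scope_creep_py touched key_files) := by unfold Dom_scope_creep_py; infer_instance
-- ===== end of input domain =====

-- B replaces A's per-file linear scan of key_files with two sets built once (exact keys and
-- directory prefixes) and a per-file membership check of the file and of its slash-terminated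
-- prefixes (objective: alternative algorithm, same measured cost).

-- ===== PORT A =====
-- helper _file_in_key_set: scan key_files, early return on a match
def fileInKeySet (path : String) : List String → Bool
  | [] => false
  | key :: rest =>
    if key = "" then fileInKeySet path rest
    else if PySem.Str.endswith key "/" then
      (if PySem.Str.startswith path key then true else fileInKeySet path rest)
    else if path = key then true else fileInKeySet path rest

-- the 'for f in touched_list' loop with early return True
def creepLoop (key_files : List String) : List String → Bool
  | [] => false
  | f :: rest => if !(fileInKeySet f key_files) then true else creepLoop key_files rest

def scope_creep_py (touched : List String) (key_files : List String) : Bool :=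
  if touched = [] then false
  else if key_files = [] then true
  else creepLoop key_files touched

-- ===== PORT B =====
-- one pass over key_files building (exact, dirs)
def splitKeys (key_files : List String) : PySem.Set String × PySem.Set String :=
  key_files.foldl (fun st key =>
    if PySem.Str.endswith key "/" then (st.1, PySem.Set.add st.2 key)
    else if key ≠ "" then (PySem.Set.add st.1 key, st.2)
    else st) (PySem.Set.empty, PySem.Set.empty)

-- helper _covered: exact-set membership or a slash-terminated prefix in dirs
def coveredB (f : String) (exact dirs : PySem.Set String) : Bool :=
  PySem.Set.contains exact f ||
  (PySem.List.enumerate f.toList 0).any (fun p =>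
    p.2 == '/' && PySem.Set.contains dirs (PySem.Str.slice f none (some (p.1 + 1))))

def scope_creep_py_alt (touched : List String) (key_files : List String) : Bool :=
  if touched = [] then false
  else if key_files = [] then true
  else
    let st := splitKeys key_files
    touched.any (fun f => !(coveredB f st.1 st.2))

-- ===== PRECONDITION & SPEC =====
def Spec_scope_creep_py (touched : List String) (key_files : List String) (out : Bool) : Prop := out = scope_creep_py_alt touched key_files
instance (touched : List String) (key_files : List String) (out : Bool) : Decidable (Spec_scope_creep_py touched key_files out) := by unfold Spec_scope_creep_py; infer_instance

-- ===== CLAIM (what is proved, stated in full; the proofs are below) =====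
def Claim_equal_scope_creep_py : Prop := ∀ (touched : List String) (key_files : List String), Dom_scope_creep_py touched key_files → Spec_scope_creep_py touched key_files (scope_creep_py touched key_files)

-- ===== LEMMAS AND PROOFS =====

-- the per-key test A's scan applies
def aMatch (f k : String) : Bool :=
  if k = "" then false
  else if PySem.Str.endswith k "/" then PySem.Str.startswith f k
  else f == k

theorem fileInKeySet_eq_any (f : String) (ks : List String) :
    fileInKeySet f ks = ks.any (aMatch f) := by
  induction ks with
  | nil => rfl
  | cons k t ih =>
    show (if k = "" then fileInKeySet f t
      else if PySem.Str.endswith k "/" then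
        (if PySem.Str.startswith f k then true else fileInKeySet f t)
      else if f = k then true else fileInKeySet f t) = (aMatch f k || t.any (aMatch f))
    by_cases h0 : k = ""
    · have ha : aMatch f k = false := by unfold aMatch; rw [if_pos h0]
      rw [if_pos h0, ha, ih, Bool.false_or]
    · by_cases he : PySem.Str.endswith k "/" = true
      · have ha : aMatch f k = PySem.Str.startswith f k := by unfold aMatch; rw [if_neg h0, if_pos he]
        rw [if_neg h0, if_pos he, ha]
        by_cases hs : PySem.Str.startswith f k = true
        · rw [if_pos hs, hs, Bool.true_or]
        · rw [if_neg hs, Bool.eq_false_iff.mpr hs, Bool.false_or, ih]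
      · have ha : aMatch f k = (f == k) := by unfold aMatch; rw [if_neg h0, if_neg he]
        rw [if_neg h0, if_neg he, ha]
        by_cases hq : f = k
        · rw [if_pos hq, beq_iff_eq.mpr hq, Bool.true_or]
        · rw [if_neg hq, beq_false_of_ne hq, Bool.false_or, ih]

-- a Python key ending in "/" is nonempty
theorem ne_empty_of_endswith_slash (k : String) (hk : PySem.Str.endswith k "/" = true) :
    k ≠ "" := by
  rw [PySem.Str.endswith_eq, PySem.Chars.endswith_iff] at hk
  intro h; subst h
  simpa using hk.length_le

-- membership in the two sets the fold builds, for any starting accumulators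
theorem splitKeys_fold_mem (ks : List String) (E D : PySem.Set String) (x : String) :
    (x ∈ (ks.foldl (fun st key =>
        if PySem.Str.endswith key "/" then (st.1, PySem.Set.add st.2 key)
        else if key ≠ "" then (PySem.Set.add st.1 key, st.2)
        else st) (E, D)).1 ↔
      x ∈ E ∨ (x ∈ ks ∧ x ≠ "" ∧ PySem.Str.endswith x "/" = false)) ∧
    (x ∈ (ks.foldl (fun st key =>
        if PySem.Str.endswith key "/" then (st.1, PySem.Set.add st.2 key)
        else if key ≠ "" then (PySem.Set.add st.1 key, st.2)
        else st) (E, D)).2 ↔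
      x ∈ D ∨ (x ∈ ks ∧ PySem.Str.endswith x "/" = true)) := by
  induction ks generalizing E D with
  | nil => simp
  | cons k t ih =>
    by_cases he : PySem.Str.endswith k "/" = true
    · have key : List.foldl (fun (st : PySem.Set String × PySem.Set String) key =>
          if PySem.Str.endswith key "/" then (st.1, PySem.Set.add st.2 key)
          else if key ≠ "" then (PySem.Set.add st.1 key, st.2)
          else st) (E, D) (k :: t) = List.foldl (fun (st : PySem.Set String × PySem.Set String) key =>
          if PySem.Str.endswith key "/" then (st.1, PySem.Set.add st.2 key)
          else if key ≠ "" then (PySem.Set.add st.1 key, st.2)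
          else st) (E, PySem.Set.add D k) t := by
        rw [List.foldl_cons]
        congr 1
        show (if PySem.Str.endswith k "/" then (E, PySem.Set.add D k)
          else if k ≠ "" then (PySem.Set.add E k, D) else (E, D)) = (E, PySem.Set.add D k)
        rw [if_pos he]
      rw [key]
      obtain ⟨ih1, ih2⟩ := ih E (PySem.Set.add D k)
      rw [ih1, ih2, PySem.Set.mem_add]
      simp only [List.mem_cons]
      constructor
      · constructor
        · rintro (h | ⟨hm, h2⟩)
          · exact Or.inl h
          · exact Or.inr ⟨Or.inr hm, h2⟩
        · rintro (h | ⟨hm | hm, h2⟩)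
          · exact Or.inl h
          · subst hm; rw [he] at h2; simp at h2
          · exact Or.inr ⟨hm, h2⟩
      · constructor
        · rintro ((h | rfl) | ⟨hm, h2⟩)
          · exact Or.inl h
          · exact Or.inr ⟨Or.inl rfl, he⟩
          · exact Or.inr ⟨Or.inr hm, h2⟩
        · rintro (h | ⟨rfl | hm, h2⟩)
          · exact Or.inl (Or.inl h)
          · exact Or.inl (Or.inr rfl)
          · exact Or.inr ⟨hm, h2⟩
    · have he' : PySem.Str.endswith k "/" = false := Bool.eq_false_iff.mpr he
      by_cases h0 : k = ""
      · have key : List.foldl (fun (st : PySem.Set String × PySem.Set String) key =>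
            if PySem.Str.endswith key "/" then (st.1, PySem.Set.add st.2 key)
            else if key ≠ "" then (PySem.Set.add st.1 key, st.2)
            else st) (E, D) (k :: t) = List.foldl (fun (st : PySem.Set String × PySem.Set String) key =>
            if PySem.Str.endswith key "/" then (st.1, PySem.Set.add st.2 key)
            else if key ≠ "" then (PySem.Set.add st.1 key, st.2)
            else st) (E, D) t := by
          rw [List.foldl_cons]
          congr 1
          show (if PySem.Str.endswith k "/" then (E, PySem.Set.add D k)
            else if k ≠ "" then (PySem.Set.add E k, D) else (E, D)) = (E, D)
          rw [if_neg he, if_neg (by simp [h0])]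
        rw [key]
        obtain ⟨ih1, ih2⟩ := ih E D
        rw [ih1, ih2]
        simp only [List.mem_cons]
        subst h0
        constructor
        · constructor
          · rintro (h | ⟨hm, h2⟩)
            · exact Or.inl h
            · exact Or.inr ⟨Or.inr hm, h2⟩
          · rintro (h | ⟨rfl | hm, h2, h3⟩)
            · exact Or.inl h
            · exact absurd rfl h2
            · exact Or.inr ⟨hm, h2, h3⟩
        · constructor
          · rintro (h | ⟨hm, h2⟩)
            · exact Or.inl h
            · exact Or.inr ⟨Or.inr hm, h2⟩
          · rintro (h | ⟨rfl | hm, h2⟩)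
            · exact Or.inl h
            · rw [he'] at h2; simp at h2
            · exact Or.inr ⟨hm, h2⟩
      · have key : List.foldl (fun (st : PySem.Set String × PySem.Set String) key =>
            if PySem.Str.endswith key "/" then (st.1, PySem.Set.add st.2 key)
            else if key ≠ "" then (PySem.Set.add st.1 key, st.2)
            else st) (E, D) (k :: t) = List.foldl (fun (st : PySem.Set String × PySem.Set String) key =>
            if PySem.Str.endswith key "/" then (st.1, PySem.Set.add st.2 key)
            else if key ≠ "" then (PySem.Set.add st.1 key, st.2)
            else st) (PySem.Set.add E k, D) t := by
          rw [List.foldl_cons]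
          congr 1
          show (if PySem.Str.endswith k "/" then (E, PySem.Set.add D k)
            else if k ≠ "" then (PySem.Set.add E k, D) else (E, D)) = (PySem.Set.add E k, D)
          rw [if_neg he, if_pos h0]
        rw [key]
        obtain ⟨ih1, ih2⟩ := ih (PySem.Set.add E k) D
        rw [ih1, ih2, PySem.Set.mem_add]
        simp only [List.mem_cons]
        constructor
        · constructor
          · rintro ((h | rfl) | ⟨hm, h2⟩)
            · exact Or.inl h
            · exact Or.inr ⟨Or.inl rfl, h0, he'⟩
            · exact Or.inr ⟨Or.inr hm, h2⟩
          · rintro (h | ⟨rfl | hm, h2⟩)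
            · exact Or.inl (Or.inl h)
            · exact Or.inl (Or.inr rfl)
            · exact Or.inr ⟨hm, h2⟩
        · constructor
          · rintro (h | ⟨hm, h2⟩)
            · exact Or.inl h
            · exact Or.inr ⟨Or.inr hm, h2⟩
          · rintro (h | ⟨rfl | hm, h2⟩)
            · exact Or.inl h
            · rw [he'] at h2; simp at h2
            · exact Or.inr ⟨hm, h2⟩

-- a key ending in "/" is a prefix of f iff it is one of f's slash-terminated prefixes
theorem dir_prefix_iff (f k : String) (hk : PySem.Str.endswith k "/" = true) :
    (∃ i : Nat, ∃ _ : i < f.toList.length, f.toList[i] = '/' ∧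
        PySem.Str.slice f none (some ((i : Int) + 1)) = k) ↔
      PySem.Str.startswith f k = true := by
  rw [PySem.Str.endswith_eq, PySem.Chars.endswith_iff] at hk
  rw [PySem.Str.startswith_eq, PySem.Chars.startswith_iff]
  constructor
  · rintro ⟨i, hi, _, hs⟩
    have h1 : (PySem.Str.slice f none (some ((i : Int) + 1))).toList = k.toList := by rw [hs]
    rw [PySem.Str.toList_slice, PySem.Chars.slice_eq_listSlice] at h1
    have hcast : ((i : Int) + 1) = ((i + 1 : Nat) : Int) := by push_cast; ring
    rw [hcast, PySem.List.slice_to_natCast] at h1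
    rw [← h1]
    exact List.take_prefix _ _
  · intro hp
    obtain ⟨u, hu⟩ := hk
    have hlen : k.toList.length = u.length + 1 := by rw [← hu]; simp
    have hle : k.toList.length ≤ f.toList.length := hp.length_le
    refine ⟨u.length, by omega, ?_, ?_⟩
    · have h1 : k.toList[u.length]'(by omega) = f.toList[u.length]'(by omega) :=
        hp.getElem (by omega)
      have h3 : (u ++ ['/'])[u.length]'(by simp) = '/' := by simp
      have h4 : k.toList[u.length]'(by omega) = '/' := by
        rw [List.getElem_of_eq hu.symm]; exact h3
      rw [← h1]; exact h4
    · apply String.toList_inj.mp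
      rw [PySem.Str.toList_slice, PySem.Chars.slice_eq_listSlice]
      have hcast : ((u.length : Int) + 1) = ((u.length + 1 : Nat) : Int) := by push_cast; ring
      rw [hcast, PySem.List.slice_to_natCast]
      have := List.prefix_iff_eq_take.mp hp
      rw [← hlen, ← this]

-- B's slash-terminated-prefix scan, as an existential
theorem anyDir_iff (f : String) (D : PySem.Set String) :
    ((PySem.List.enumerate f.toList 0).any (fun p =>
        p.2 == '/' && PySem.Set.contains D (PySem.Str.slice f none (some (p.1 + 1)))) = true) ↔
      ∃ i : Nat, ∃ _ : i < f.toList.length, f.toList[i] = '/' ∧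
        PySem.Str.slice f none (some ((i : Int) + 1)) ∈ D := by
  simp only [List.any_eq_true, PySem.List.mem_enumerate_iff]
  constructor
  · rintro ⟨p, ⟨i, hi, rfl⟩, hp⟩
    simp only [zero_add, Bool.and_eq_true, beq_iff_eq, PySem.Set.contains, List.contains_eq_mem,
      decide_eq_true_eq] at hp
    exact ⟨i, hi, hp.1, hp.2⟩
  · rintro ⟨i, hi, hc, hm⟩
    refine ⟨((i : Int), f.toList[i]), ⟨i, hi, by simp⟩, ?_⟩
    simp only [Bool.and_eq_true, beq_iff_eq, PySem.Set.contains, List.contains_eq_mem,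
      decide_eq_true_eq]
    exact ⟨hc, hm⟩

-- per-file agreement of the two "covered" tests
theorem covered_eq (f : String) (ks : List String) :
    coveredB f (splitKeys ks).1 (splitKeys ks).2 = fileInKeySet f ks := by
  rw [fileInKeySet_eq_any, Bool.eq_iff_iff]
  unfold coveredB splitKeys
  rw [Bool.or_eq_true, anyDir_iff, List.any_eq_true]
  have hE := fun x => (splitKeys_fold_mem ks PySem.Set.empty PySem.Set.empty x).1
  have hD := fun x => (splitKeys_fold_mem ks PySem.Set.empty PySem.Set.empty x).2
  simp only [PySem.Set.contains, List.contains_eq_mem, decide_eq_true_eq]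
  constructor
  · rintro (hf | ⟨i, hi, hc, hm⟩)
    · rcases (hE f).mp hf with h | ⟨hm, h0, he⟩
      · simp [PySem.Set.empty] at h
      · refine ⟨f, hm, ?_⟩
        unfold aMatch
        rw [if_neg h0, if_neg (by simp only [he]; decide), beq_self_eq_true]
    · rcases (hD _).mp hm with h | ⟨hm', he⟩
      · simp [PySem.Set.empty] at h
      · refine ⟨_, hm', ?_⟩
        have hs := (dir_prefix_iff f _ he).mp ⟨i, hi, hc, rfl⟩
        unfold aMatch
        rw [if_neg (ne_empty_of_endswith_slash _ he), if_pos he]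
        exact hs
  · rintro ⟨k, hm, hmatch⟩
    unfold aMatch at hmatch
    by_cases h0 : k = ""
    · simp [h0] at hmatch
    · by_cases he : PySem.Str.endswith k "/" = true
      · rw [if_neg h0, if_pos he] at hmatch
        obtain ⟨i, hi, hc, hs⟩ := (dir_prefix_iff f k he).mpr hmatch
        exact Or.inr ⟨i, hi, hc, (hD _).mpr (Or.inr ⟨hs ▸ hm, hs ▸ he⟩)⟩
      · have he' : PySem.Str.endswith k "/" = false := Bool.eq_false_iff.mpr he
        rw [if_neg h0, if_neg he, beq_iff_eq] at hmatch
        subst hmatch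
        exact Or.inl ((hE f).mpr (Or.inr ⟨hm, h0, he'⟩))

theorem creepLoop_eq_any (ks ts : List String) :
    creepLoop ks ts = ts.any (fun f => !(fileInKeySet f ks)) := by
  induction ts with
  | nil => simp [creepLoop]
  | cons f t ih =>
    simp only [creepLoop, List.any_cons, ih]
    by_cases h : fileInKeySet f ks = true <;> simp [h]

-- ===== VERDICT (by name: the statement is the Claim_ definition above) =====
theorem scope_creep_py_spec : Claim_equal_scope_creep_py := by
  intro touched key_files _
  unfold Spec_scope_creep_py scope_creep_py scope_creep_py_alt
  by_cases h1 : touched = []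
  · simp [h1]
  · by_cases h2 : key_files = []
    · simp [h1, h2]
    · simp only [h1, h2, if_false]
      rw [creepLoop_eq_any]
      have hfun : (fun f => !(coveredB f (splitKeys key_files).1 (splitKeys key_files).2)) =
          (fun f => !(fileInKeySet f key_files)) := funext fun f => by rw [covered_eq]
      show _ = touched.any fun f => !(coveredB f (splitKeys key_files).1 (splitKeys key_files).2)
      rw [hfun]
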